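-- pv_equiv track=rewrite | github.com/suvambh/CV-creator | app/forms/form_parser.py | collect_education
-- ===== SOURCE A (Python) =====
-- from typing import Any, Mapping
--
-- def _getlist(form: Mapping[str, Any], key: str) -> list[str]:
--     getter = getattr(form, "getlist", None)
--     if callable(getter):
--         return getter(key)
--     value = form.get(key, [])
--     if isinstance(value, list):
--         return value
--     if value == "":
--         return []
--     return [value]
--
-- def collect_education(form: Mapping[str, Any]) -> list[dict[str, Any]]:
--     degrees = _getlist(form, "education_degree[]")
--     institutions = _getlist(form, "education_institution[]")
--     years = _getlist(form, "education_year[]")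
--
--     education: list[dict[str, Any]] = []
--     max_len = max([len(degrees), len(institutions), len(years)], default=0)
--
--     for i in range(max_len):
--         degree = degrees[i].strip() if i < len(degrees) else ""
--         institution = institutions[i].strip() if i < len(institutions) else ""
--         year = years[i].strip() if i < len(years) else ""
--
--         if not any([degree, institution, year]):
--             continue
--
--         entry: dict[str, Any] = {}
--         if degree:
--             entry["degree"] = degree
--         if institution:
--             entry["institution"] = institution
--         if year:
--             entry["year"] = year
--
--         education.append(entry)
--
--     return education
-- ===== SOURCE B (Python) =====
-- def collect_education(form):
--     # Column-major: index each field column into a sparse map row-index -> entry,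
--     # then emit the non-empty rows in index order.
--     cells = {}
--     for key, name in (("education_degree[]", "degree"),
--                       ("education_institution[]", "institution"),
--                       ("education_year[]", "year")):
--         for i, raw in enumerate(form.get(key, [])):
--             value = raw.strip()
--             if value:
--                 cells.setdefault(i, {})[name] = value
--     return [cells[i] for i in sorted(cells)]
-- ===== Notes on version B (the rewrite author's own statement) =====
-- stated objective: alternative
-- what changed: Instead of A's row-major index loop with max_len and per-field bounds checks, B traverses column-major: each field list is indexed separately into a sparse dict mapping row index to a partially built entry (setdefault), and the result is the entries at sorted indices.
import Mathlib
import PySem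

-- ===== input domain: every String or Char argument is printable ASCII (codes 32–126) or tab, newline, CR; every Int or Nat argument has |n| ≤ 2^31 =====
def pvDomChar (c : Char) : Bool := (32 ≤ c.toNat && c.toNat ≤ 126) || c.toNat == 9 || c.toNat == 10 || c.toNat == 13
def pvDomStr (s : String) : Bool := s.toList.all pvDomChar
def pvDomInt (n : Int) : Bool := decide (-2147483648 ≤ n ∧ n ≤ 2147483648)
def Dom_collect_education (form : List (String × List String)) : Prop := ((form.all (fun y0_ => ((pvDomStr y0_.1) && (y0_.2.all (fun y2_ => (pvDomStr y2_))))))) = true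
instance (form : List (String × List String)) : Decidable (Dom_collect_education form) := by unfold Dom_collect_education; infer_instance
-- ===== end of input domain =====

-- B replaces A's row-major index loop (max_len + per-field bounds checks) by a column-major
-- pass building a sparse index->entry dict, emitted at sorted indices; return values proved equal.

-- ===== PORT A =====
-- _getlist: on a plain dict (our domain) it is form.get(key, []) (the value is already a list)
def pvGetlist (form : List (String × List String)) (key : String) : List String :=
  PySem.Dict.getD (PySem.Dict.mk form) key []

def collect_education (form : List (String × List String)) : List (List (String × String)) :=
  let degrees := pvGetlist form "education_degree[]"
  let institutions := pvGetlist form "education_institution[]"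
  let years := pvGetlist form "education_year[]"
  let max_len : Int := max (max (degrees.length : Int) (institutions.length : Int)) (years.length : Int)
  (PySem.List.pyRange 0 max_len 1).foldl (fun education i =>
    let degree := if i < (degrees.length : Int) then PySem.Str.strip (PySem.List.pyGetD degrees i "") else ""
    let institution := if i < (institutions.length : Int) then PySem.Str.strip (PySem.List.pyGetD institutions i "") else ""
    let year := if i < (years.length : Int) then PySem.Str.strip (PySem.List.pyGetD years i "") else ""
    if degree = "" ∧ institution = "" ∧ year = "" then education
    else
      let entry : List (String × String) :=
        (if degree ≠ "" then [("degree", degree)] else []) ++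
        (if institution ≠ "" then [("institution", institution)] else []) ++
        (if year ≠ "" then [("year", year)] else [])
      education ++ [entry]) []

-- ===== PORT B =====
-- inner loop body: 'v = raw.strip(); if v: cells.setdefault(i, {})[name] = v'
-- (the inner-dict assignment always writes a FRESH key — each field name is written at most
--  once per row index — so it is ported exactly as appending the pair to the stored entry)
def bStep (name : String) (cells : PySem.Dict Int (List (String × String)))
    (p : Int × String) : PySem.Dict Int (List (String × String)) :=
  let value := PySem.Str.strip p.2
  if value = "" then cells
  else cells.insert p.1 (cells.getD p.1 [] ++ [(name, value)])

def collect_education_alt (form : List (String × List String)) : List (List (String × String)) :=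
  let cells :=
    [("education_degree[]", "degree"), ("education_institution[]", "institution"),
     ("education_year[]", "year")].foldl
      (fun cells kn =>
        (PySem.List.enumerate (PySem.Dict.getD (PySem.Dict.mk form) kn.1 [])).foldl
          (bStep kn.2) cells)
      PySem.Dict.empty
  -- '[cells[i] for i in sorted(cells)]' — every sorted key is present, so cells[i] = getD i []
  (PySem.List.sorted cells.keys (fun x => x) false).map (fun i => cells.getD i [])

-- ===== PRECONDITION & SPEC =====
def Spec_collect_education (form : List (String × List String)) (out : List (List (String × String))) : Prop := out = collect_education_alt form
instance (form : List (String × List String)) (out : List (List (String × String))) : Decidable (Spec_collect_education form out) := by unfold Spec_collect_education; infer_instance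

-- ===== CLAIM (what is proved, stated in full; the proofs are below) =====
def Claim_equal_collect_education : Prop := ∀ (form : List (String × List String)), Dom_collect_education form → Spec_collect_education form (collect_education form)

-- ===== LEMMAS AND PROOFS =====

-- the stripped field of column xs at row i ("" when the column is shorter), and the
-- (key, value) fragment it contributes to row i's entry
def cellF (xs : List String) (i : Nat) : String :=
  if i < xs.length then PySem.Str.strip (xs.getD i "") else ""

def cell (name : String) (xs : List String) (i : Nat) : List (String × String) :=
  if cellF xs i = "" then [] else [(name, cellF xs i)]

def row (ds is_ ys : List String) (i : Nat) : List (String × String) :=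
  cell "degree" ds i ++ cell "institution" is_ i ++ cell "year" ys i

-- what one column contributes at Int key j when its enumeration starts at s
def colVal (name : String) : List String → Int → Int → List (String × String)
  | [], _, _ => []
  | x :: xs, s, j =>
    if j = s then (if PySem.Str.strip x = "" then [] else [(name, PySem.Str.strip x)])
    else colVal name xs (s + 1) j

lemma colVal_eq_nil_of_lt (name : String) :
    ∀ (xs : List String) (s j : Int), j < s → colVal name xs s j = [] := by
  intro xs
  induction xs with
  | nil => intro s j _; rfl
  | cons x xs ih =>
    intro s j h
    simp only [colVal, if_neg (by omega : ¬ j = s)]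
    exact ih (s + 1) j (by omega)

lemma colVal_eq_cell (name : String) :
    ∀ (xs : List String) (s i : Nat), colVal name xs (s : Int) ((s : Int) + (i : Int)) = cell name xs i := by
  intro xs
  induction xs with
  | nil =>
    intro s i
    simp [colVal, cell, cellF]
  | cons x xs ih =>
    intro s i
    cases i with
    | zero =>
      simp only [Nat.cast_zero, add_zero, colVal]
      simp [cell, cellF, List.getD]
    | succ k =>
      have hne : (s : Int) + ((k + 1 : Nat) : Int) ≠ (s : Int) := by push_cast; omega
      have hrw : (s : Int) + ((k + 1 : Nat) : Int) = ((s + 1 : Nat) : Int) + (k : Int) := by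
        push_cast; ring
      simp only [colVal]
      rw [if_neg hne, hrw,
        show ((s : Int) + 1) = ((s + 1 : Nat) : Int) by push_cast; ring, ih (s + 1) k]
      simp [cell, cellF, List.getD]

-- one column's fold, characterised by its effect on every lookup
lemma colFold_get? (name : String) :
    ∀ (xs : List String) (s : Int) (d : PySem.Dict Int (List (String × String))) (j : Int),
      ((PySem.List.enumerate xs s).foldl (bStep name) d).get? j =
        match d.get? j with
        | some e => some (e ++ colVal name xs s j)
        | none => if colVal name xs s j = [] then none else some (colVal name xs s j) := by
  intro xs
  induction xs with
  | nil =>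
    intro s d j
    simp only [PySem.List.enumerate_nil, List.foldl_nil, colVal]
    cases d.get? j <;> simp
  | cons x xs ih =>
    intro s d j
    rw [PySem.List.enumerate_cons, List.foldl_cons]
    by_cases hx : PySem.Str.strip x = ""
    · have hb : bStep name d (s, x) = d := by simp [bStep, hx]
      rw [hb, ih (s + 1) d j]
      by_cases hj : j = s
      · subst hj
        rw [colVal_eq_nil_of_lt name xs (j + 1) j (by omega)]
        simp only [colVal, if_pos hx]
        cases d.get? j <;> simp
      · simp only [colVal, if_neg hj]
    · have hb : bStep name d (s, x) = d.insert s (d.getD s [] ++ [(name, PySem.Str.strip x)]) := by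
        simp [bStep, hx]
      rw [hb, ih (s + 1) _ j, PySem.Dict.get?_insert]
      by_cases hj : j = s
      · subst hj
        rw [if_pos rfl, colVal_eq_nil_of_lt name xs (j + 1) j (by omega)]
        simp only [colVal, if_neg hx]
        cases h : d.get? j with
        | none => simp [PySem.Dict.getD_eq_get?_getD, h]
        | some e => simp [PySem.Dict.getD_eq_get?_getD, h]
      · rw [if_neg hj]
        simp only [colVal, if_neg hj]

lemma colFold_nodup (name : String) :
    ∀ (l : List (Int × String)) (d : PySem.Dict Int (List (String × String))),
      d.keys.Nodup → (l.foldl (bStep name) d).keys.Nodup := by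
  intro l
  induction l with
  | nil => intro d h; exact h
  | cons p l ih =>
    intro d h
    rw [List.foldl_cons]
    apply ih
    by_cases hv : PySem.Str.strip p.2 = ""
    · simpa [bStep, hv] using h
    · have hb : bStep name d p = d.insert p.1 (d.getD p.1 [] ++ [(name, PySem.Str.strip p.2)]) := by
        simp [bStep, hv]
      rw [hb]
      exact PySem.Dict.nodup_keys_insert _ _ _ h

-- the whole cells dict, characterised per lookup: the three column contributions, appended
lemma cells_get? (ds is_ ys : List String) (j : Int) :
    ((PySem.List.enumerate ys 0).foldl (bStep "year")
      ((PySem.List.enumerate is_ 0).foldl (bStep "institution")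
        ((PySem.List.enumerate ds 0).foldl (bStep "degree") PySem.Dict.empty))).get? j =
      (if (colVal "degree" ds 0 j ++ colVal "institution" is_ 0 j ++ colVal "year" ys 0 j) = []
       then none
       else some (colVal "degree" ds 0 j ++ colVal "institution" is_ 0 j ++ colVal "year" ys 0 j)) := by
  rw [colFold_get?, colFold_get?, colFold_get?, PySem.Dict.get?_empty]
  by_cases h1 : colVal "degree" ds 0 j = [] <;>
    by_cases h2 : colVal "institution" is_ 0 j = [] <;>
      by_cases h3 : colVal "year" ys 0 j = [] <;>
        simp [h1, h2, h3]

lemma r3_natCast (ds is_ ys : List String) (i : Nat) :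
    colVal "degree" ds 0 (i : Int) ++ colVal "institution" is_ 0 (i : Int) ++ colVal "year" ys 0 (i : Int)
      = row ds is_ ys i := by
  have h := colVal_eq_cell "degree" ds 0 i
  have h2 := colVal_eq_cell "institution" is_ 0 i
  have h3 := colVal_eq_cell "year" ys 0 i
  simp only [Nat.cast_zero, zero_add] at h h2 h3
  rw [h, h2, h3, row]

lemma r3_neg (ds is_ ys : List String) (j : Int) (hj : j < 0) :
    colVal "degree" ds 0 j ++ colVal "institution" is_ 0 j ++ colVal "year" ys 0 j = [] := by
  rw [colVal_eq_nil_of_lt _ _ _ _ hj, colVal_eq_nil_of_lt _ _ _ _ hj, colVal_eq_nil_of_lt _ _ _ _ hj]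
  rfl

lemma row_eq_nil_of_ge (ds is_ ys : List String) (i : Nat)
    (h : max (max ds.length is_.length) ys.length ≤ i) : row ds is_ ys i = [] := by
  simp only [row, cell, cellF]
  rw [if_neg (by omega : ¬ i < ds.length), if_neg (by omega : ¬ i < is_.length),
      if_neg (by omega : ¬ i < ys.length)]
  simp

-- A's index loop, closed into range/filter/map form
lemma A_canonical (ds is_ ys : List String) :
    (PySem.List.pyRange 0 (max (max (ds.length : Int) (is_.length : Int)) (ys.length : Int)) 1).foldl
      (fun education i =>
        let degree := if i < (ds.length : Int) then PySem.Str.strip (PySem.List.pyGetD ds i "") else ""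
        let institution := if i < (is_.length : Int) then PySem.Str.strip (PySem.List.pyGetD is_ i "") else ""
        let year := if i < (ys.length : Int) then PySem.Str.strip (PySem.List.pyGetD ys i "") else ""
        if degree = "" ∧ institution = "" ∧ year = "" then education
        else
          let entry : List (String × String) :=
            (if degree ≠ "" then [("degree", degree)] else []) ++
            (if institution ≠ "" then [("institution", institution)] else []) ++
            (if year ≠ "" then [("year", year)] else [])
          education ++ [entry]) []
    = ((List.range (max (max ds.length is_.length) ys.length)).filter
        (fun i => decide (row ds is_ ys i ≠ []))).map (row ds is_ ys) := by
  have hN : max (max (ds.length : Int) (is_.length : Int)) (ys.length : Int)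
      = ((max (max ds.length is_.length) ys.length : Nat) : Int) := by push_cast; rfl
  rw [hN, PySem.List.pyRange_zero_natCast, List.foldl_map]
  rw [show (fun (education : List (List (String × String))) (k : Nat) =>
        let degree := if (k : Int) < (ds.length : Int) then PySem.Str.strip (PySem.List.pyGetD ds (k : Int) "") else ""
        let institution := if (k : Int) < (is_.length : Int) then PySem.Str.strip (PySem.List.pyGetD is_ (k : Int) "") else ""
        let year := if (k : Int) < (ys.length : Int) then PySem.Str.strip (PySem.List.pyGetD ys (k : Int) "") else ""
        if degree = "" ∧ institution = "" ∧ year = "" then education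
        else
          let entry : List (String × String) :=
            (if degree ≠ "" then [("degree", degree)] else []) ++
            (if institution ≠ "" then [("institution", institution)] else []) ++
            (if year ≠ "" then [("year", year)] else [])
          education ++ [entry])
      = fun education k =>
          if decide (row ds is_ ys k ≠ []) then education ++ [row ds is_ ys k] else education by
    funext education k
    have hd : (if (k : Int) < (ds.length : Int) then PySem.Str.strip (PySem.List.pyGetD ds (k : Int) "") else "")
        = cellF ds k := by
      simp [cellF, PySem.List.pyGetD_natCast, Nat.cast_lt]
    have hi : (if (k : Int) < (is_.length : Int) then PySem.Str.strip (PySem.List.pyGetD is_ (k : Int) "") else "")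
        = cellF is_ k := by
      simp [cellF, PySem.List.pyGetD_natCast, Nat.cast_lt]
    have hy : (if (k : Int) < (ys.length : Int) then PySem.Str.strip (PySem.List.pyGetD ys (k : Int) "") else "")
        = cellF ys k := by
      simp [cellF, PySem.List.pyGetD_natCast, Nat.cast_lt]
    simp only [hd, hi, hy]
    by_cases h1 : cellF ds k = "" <;> by_cases h2 : cellF is_ k = "" <;> by_cases h3 : cellF ys k = "" <;>
      simp [row, cell, h1, h2, h3]]
  exact PySem.List.foldl_append_if _ _ _ _

-- B's sorted key list IS the increasing list of non-empty row indices
lemma B_canonical (ds is_ ys : List String) :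
    (PySem.List.sorted
      (((PySem.List.enumerate ys 0).foldl (bStep "year")
        ((PySem.List.enumerate is_ 0).foldl (bStep "institution")
          ((PySem.List.enumerate ds 0).foldl (bStep "degree") PySem.Dict.empty))).keys)
      (fun x => x) false).map
      (fun i => ((PySem.List.enumerate ys 0).foldl (bStep "year")
        ((PySem.List.enumerate is_ 0).foldl (bStep "institution")
          ((PySem.List.enumerate ds 0).foldl (bStep "degree") PySem.Dict.empty))).getD i [])
    = ((List.range (max (max ds.length is_.length) ys.length)).filter
        (fun i => decide (row ds is_ ys i ≠ []))).map (row ds is_ ys) := by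
  set N := max (max ds.length is_.length) ys.length with hNdef
  set C := (PySem.List.enumerate ys 0).foldl (bStep "year")
      ((PySem.List.enumerate is_ 0).foldl (bStep "institution")
        ((PySem.List.enumerate ds 0).foldl (bStep "degree") PySem.Dict.empty)) with hCdef
  set T := ((List.range N).filter (fun i => decide (row ds is_ ys i ≠ []))).map
      (Nat.cast : Nat → Int) with hTdef
  have hCnd : C.keys.Nodup :=
    colFold_nodup _ _ _ (colFold_nodup _ _ _ (colFold_nodup _ _ _ PySem.Dict.nodup_keys_empty))
  have hkeys : ∀ j : Int, j ∈ C.keys ↔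
      colVal "degree" ds 0 j ++ colVal "institution" is_ 0 j ++ colVal "year" ys 0 j ≠ [] := by
    intro j
    rw [show (j ∈ C.keys ↔ ¬ C.get? j = none) by
      rw [PySem.Dict.get?_eq_none_iff_not_mem_keys]; tauto]
    rw [hCdef, cells_get?]
    split_ifs with h
    · simp [h]
    · simp only [ne_eq, not_false_eq_true, true_iff]
      exact h
  have hmem : ∀ j : Int, j ∈ C.keys ↔ j ∈ T := by
    intro j
    rw [hkeys j, hTdef]
    simp only [List.mem_map, List.mem_filter, List.mem_range, decide_eq_true_eq]
    constructor
    · intro hr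
      have hj0 : 0 ≤ j := by
        by_contra hneg
        exact hr (r3_neg ds is_ ys j (by omega))
      obtain ⟨i, rfl⟩ : ∃ i : Nat, j = (i : Int) := ⟨j.toNat, by omega⟩
      rw [r3_natCast] at hr
      refine ⟨i, ⟨?_, hr⟩, rfl⟩
      by_contra hge
      exact hr (row_eq_nil_of_ge ds is_ ys i (by omega))
    · rintro ⟨i, ⟨-, hr⟩, rfl⟩
      rw [r3_natCast]
      exact hr
  have hTnd : T.Nodup := by
    refine List.Nodup.map (fun a b h => by exact_mod_cast h) ?_
    exact List.Nodup.filter _ List.nodup_range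
  have hTpw : T.Pairwise (fun a b : Int => a < b) := by
    rw [hTdef, List.pairwise_map]
    exact List.Pairwise.filter _ (by simpa using List.pairwise_lt_range (n := N))
  have hsorted : PySem.List.sorted C.keys (fun x => x) false = T := by
    refine PySem.List.sorted_eq_of_perm_of_pairwise_lt _ _ _ ?_ hTpw
    refine List.perm_of_nodup_nodup_toFinset_eq hTnd hCnd ?_
    ext j
    simp only [List.mem_toFinset]
    exact (hmem j).symm
  rw [hsorted, hTdef, List.map_map]
  refine List.map_congr_left ?_
  intro i hi
  have hr : row ds is_ ys i ≠ [] := by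
    simpa using (List.mem_filter.mp hi).2
  simp only [Function.comp_apply]
  rw [PySem.Dict.getD_eq_get?_getD, hCdef, cells_get?, r3_natCast, if_neg hr]
  rfl

-- ===== VERDICT (by name: the statement is the Claim_ definition above) =====
theorem collect_education_spec : Claim_equal_collect_education := by
  intro form _
  unfold Spec_collect_education collect_education collect_education_alt pvGetlist
  simp only [List.foldl_cons, List.foldl_nil]
  rw [A_canonical, B_canonical]
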